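-- pv_equiv track=rewrite | github.com/pengthao/py-proj-2 | flaskDemo/demo7/practice.py | big_num_three
-- ===== SOURCE A (Python) =====
-- def big_num_three(arr):
--     max_value = 0
--     left, right = 0, len(arr)-1
--     while left <= right:
--         if arr[left] > arr[right]:
--             max_value=max(max_value, arr[left])
--             left += 1
--         else: max_value = max(max_value, arr[right])
--         right -= 1
--     return max_value
-- ===== SOURCE B (Python) =====
-- def big_num_three(arr):
--     max_value = 0
--     for x in arr:
--         if x > max_value:
--             max_value = x
--     return max_value
-- ===== Notes on version B (the rewrite author's own statement) =====
-- stated objective: simpler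
-- what changed: Replaces the converging two-pointer sweep (with its asymmetric advance and element-skipping branch) by a single forward running-max scan seeded at 0.
import Mathlib
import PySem

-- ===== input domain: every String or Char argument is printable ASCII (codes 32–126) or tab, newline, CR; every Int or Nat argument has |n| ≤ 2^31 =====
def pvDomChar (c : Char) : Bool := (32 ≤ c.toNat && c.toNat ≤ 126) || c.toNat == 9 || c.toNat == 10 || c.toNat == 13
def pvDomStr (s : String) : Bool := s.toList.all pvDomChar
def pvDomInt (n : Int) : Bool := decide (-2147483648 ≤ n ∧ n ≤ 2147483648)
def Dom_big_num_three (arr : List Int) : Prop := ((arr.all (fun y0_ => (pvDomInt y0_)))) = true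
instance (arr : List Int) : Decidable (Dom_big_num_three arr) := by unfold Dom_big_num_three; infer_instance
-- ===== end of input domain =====

-- B replaces A's converging two-pointer sweep by a single forward running-max scan seeded at 0 (objective: simpler).

-- ===== PORT A =====
-- A's while loop over the two converging indices; indices are always in range
-- in reachable calls, so the unreachable out-of-range pyGet? case defaults to 0.
def bigNumThreeLoop (arr : List Int) (max_value left right : Int) : Int :=
  if _h : left ≤ right then
    let al := (PySem.List.pyGet? arr left).getD 0
    let ar := (PySem.List.pyGet? arr right).getD 0
    if al > ar then
      bigNumThreeLoop arr (max max_value al) (left + 1) (right - 1)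
    else
      bigNumThreeLoop arr (max max_value ar) left (right - 1)
  else max_value
termination_by (right - left + 1).toNat
decreasing_by all_goals omega

def big_num_three (arr : List Int) : Int :=
  bigNumThreeLoop arr 0 0 ((arr.length : Int) - 1)

-- ===== PORT B =====
def big_num_three_alt (arr : List Int) : Int :=
  arr.foldl (fun max_value x => if x > max_value then x else max_value) 0

-- ===== PRECONDITION & SPEC =====
def Spec_big_num_three (arr : List Int) (out : Int) : Prop := out = big_num_three_alt arr
instance (arr : List Int) (out : Int) : Decidable (Spec_big_num_three arr out) := by unfold Spec_big_num_three; infer_instance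

-- ===== CLAIM (what is proved, stated in full; the proofs are below) =====
def Claim_equal_big_num_three : Prop := ∀ (arr : List Int), Dom_big_num_three arr → Spec_big_num_three arr (big_num_three arr)

-- ===== LEMMAS AND PROOFS =====

-- accessor used throughout the proof
def pvA (arr : List Int) (i : Int) : Int := (PySem.List.pyGet? arr i).getD 0

-- "reference" right-to-left fold of max over the index segment [l, r]
def segFold (arr : List Int) (m l r : Int) : Int :=
  if _h : l ≤ r then segFold arr (max m (pvA arr r)) l (r - 1) else m
termination_by (r - l + 1).toNat
decreasing_by omega

lemma segFold_peel_left (arr : List Int) :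
    ∀ n (m l r : Int), (r - l + 1).toNat = n →
      segFold arr m l r = if l ≤ r then segFold arr (max m (pvA arr l)) (l + 1) r else m := by
  intro n
  induction n with
  | zero =>
    intro m l r hn
    have hlr : ¬ l ≤ r := by omega
    rw [segFold]
    simp [hlr]
  | succ k ih =>
    intro m l r hn
    have hlr : l ≤ r := by omega
    rw [segFold]
    simp only [hlr, dif_pos, if_pos]
    by_cases h2 : l ≤ r - 1
    · rw [ih _ l (r - 1) (by omega)]
      simp only [h2, if_pos]
      have h3 : l + 1 ≤ r := by omega
      conv_rhs => rw [segFold]; rw [dif_pos h3]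
      have : max (max m (pvA arr r)) (pvA arr l) = max (max m (pvA arr l)) (pvA arr r) := by
        omega
      rw [this]
    · -- l = r
      have hl : l = r := by omega
      subst hl
      have h4 : ¬ l ≤ l - 1 := by omega
      have h5 : ¬ l + 1 ≤ l := by omega
      rw [segFold]
      simp only [h4, dif_neg, not_false_iff]
      rw [segFold]
      simp [h5]

lemma loop_eq_segFold (arr : List Int) :
    ∀ n (m l r : Int), (r - l + 1).toNat = n →
      bigNumThreeLoop arr m l r = segFold arr m l r := by
  intro n
  induction n using Nat.strong_induction_on with
  | _ n ih =>
    intro m l r hn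
    by_cases hlr : l ≤ r
    · rw [bigNumThreeLoop]
      simp only [hlr, dif_pos]
      by_cases hcmp : pvA arr l > pvA arr r
      · simp only [pvA] at hcmp
        simp only [gt_iff_lt, hcmp, if_pos]
        rw [ih ((r - 1) - (l + 1) + 1).toNat (by omega) _ _ _ rfl]
        -- RHS: segFold m l r = segFold (max m (a r)) l (r-1), then peel left
        conv_rhs => rw [segFold]
        simp only [hlr, dif_pos]
        rw [segFold_peel_left arr ((r - 1) - l + 1).toNat _ l (r - 1) rfl]
        by_cases h2 : l ≤ r - 1
        · simp only [h2, if_pos]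
          have : max (max m (pvA arr r)) (pvA arr l) = max m (pvA arr l) := by
            simp only [pvA] at *
            omega
          rw [this]
          rfl
        · -- l = r, but then pvA arr l = pvA arr r contradicts hcmp
          exfalso
          have : l = r := by omega
          subst this
          exact lt_irrefl _ hcmp
      · simp only [gt_iff_lt, pvA] at hcmp
        simp only [gt_iff_lt, if_neg (by exact fun h => hcmp h)]
        rw [ih (r - 1 - l + 1).toNat (by omega) _ _ _ rfl]
        conv_rhs => rw [segFold]
        simp only [hlr, dif_pos]
        rfl
    · rw [bigNumThreeLoop, segFold]
      simp [hlr]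

lemma segFold_eq_foldl (arr : List Int) :
    ∀ n (m l : Int), 0 ≤ l → (arr.length - l.toNat) = n →
      segFold arr m l ((arr.length : Int) - 1) = (arr.drop l.toNat).foldl max m := by
  intro n
  induction n with
  | zero =>
    intro m l hl hn
    have hge : arr.length ≤ l.toNat := by omega
    have hlr : ¬ l ≤ (arr.length : Int) - 1 := by omega
    rw [segFold]
    simp [hlr, List.drop_eq_nil_of_le hge]
  | succ k ih =>
    intro m l hl hn
    have hlt : l.toNat < arr.length := by omega
    have hlr : l ≤ (arr.length : Int) - 1 := by omega
    rw [segFold_peel_left arr (((arr.length : Int) - 1) - l + 1).toNat _ l _ rfl]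
    simp only [hlr, if_pos]
    rw [ih _ (l + 1) (by omega) (by omega)]
    have hdrop : arr.drop l.toNat = arr[l.toNat] :: arr.drop (l.toNat + 1) :=
      (List.getElem_cons_drop hlt).symm
    have htn : (l + 1).toNat = l.toNat + 1 := by omega
    rw [htn, hdrop, List.foldl_cons]
    congr 1
    have hpg : PySem.List.pyGet? arr l = some arr[l.toNat] := by
      rw [PySem.List.pyGet?_of_nonneg (h := hl)]
      exact List.getElem?_eq_getElem hlt
    simp [pvA, hpg]

lemma foldl_if_eq_foldl_max (arr : List Int) :
    ∀ m : Int, arr.foldl (fun max_value x => if x > max_value then x else max_value) m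
      = arr.foldl max m := by
  induction arr with
  | nil => intro m; rfl
  | cons x t ih =>
    intro m
    simp only [List.foldl_cons, ih]
    congr 1
    by_cases h : x > m <;> simp [h] <;> omega

-- ===== VERDICT (by name: the statement is the Claim_ definition above) =====
theorem big_num_three_spec : Claim_equal_big_num_three := by
  intro arr _
  unfold Spec_big_num_three big_num_three big_num_three_alt
  rw [loop_eq_segFold arr _ 0 0 ((arr.length : Int) - 1) rfl,
      segFold_eq_foldl arr (arr.length - (0:Int).toNat) 0 0 le_rfl rfl,
      foldl_if_eq_foldl_max]
  simp
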